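-- pv_equiv track=rewrite | github.com/juniormartinxo/code-compass | apps/indexer/indexer/chunk_config.py | _split_env_blocks
-- ===== SOURCE A (Python) =====
-- def _split_env_blocks(lines: list[str]) -> list[tuple[int, int, str]]:
--     chunks: list[tuple[int, int, str]] = []
--     block_start: int | None = None
--
--     for index, line in enumerate(lines):
--         stripped = line.strip()
--         if not stripped:
--             if block_start is not None:
--                 chunk = _build_chunk(
--                     lines=lines,
--                     start_index=block_start,
--                     end_index=index - 1,
--                 )
--                 if chunk is not None:
--                     chunks.append(chunk)
--                 block_start = None
--             continue
--         if block_start is None: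
--             block_start = index
--
--     if block_start is not None:
--         chunk = _build_chunk(
--             lines=lines,
--             start_index=block_start,
--             end_index=len(lines) - 1,
--         )
--         if chunk is not None:
--             chunks.append(chunk)
--
--     return chunks
--
-- def _build_chunk(
--     *,
--     lines: list[str],
--     start_index: int,
--     end_index: int,
-- ) -> tuple[int, int, str] | None:
--     while start_index <= end_index and not lines[start_index].strip():
--         start_index += 1
--     while end_index >= start_index and not lines[end_index].strip():
--         end_index -= 1
--
--     if start_index > end_index:
--         return None
--
--     return (
--         start_index + 1,
--         end_index + 1,
--         "\n".join(lines[start_index : end_index + 1]),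
--     )
-- ===== SOURCE B (Python) =====
-- def _split_env_blocks(lines: list[str]) -> list[tuple[int, int, str]]:
--     # Two-pointer scan: each chunk is a maximal run of consecutive non-blank
--     # lines; A's trimming helper is a no-op on such runs.
--     chunks: list[tuple[int, int, str]] = []
--     n = len(lines)
--     i = 0
--     while i < n:
--         if not lines[i].strip():
--             i += 1
--             continue
--         j = i
--         while j < n and lines[j].strip():
--             j += 1
--         chunks.append((i + 1, j, "\n".join(lines[i:j])))
--         i = j
--     return chunks
-- ===== Notes on version B (the rewrite author's own statement) =====
-- stated objective: simpler
-- what changed: Replaces A's per-line state machine (Optional block_start) plus a trimming helper with dead trim loops by a direct two-pointer scan that emits each maximal non-blank run in one step.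
import Mathlib
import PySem

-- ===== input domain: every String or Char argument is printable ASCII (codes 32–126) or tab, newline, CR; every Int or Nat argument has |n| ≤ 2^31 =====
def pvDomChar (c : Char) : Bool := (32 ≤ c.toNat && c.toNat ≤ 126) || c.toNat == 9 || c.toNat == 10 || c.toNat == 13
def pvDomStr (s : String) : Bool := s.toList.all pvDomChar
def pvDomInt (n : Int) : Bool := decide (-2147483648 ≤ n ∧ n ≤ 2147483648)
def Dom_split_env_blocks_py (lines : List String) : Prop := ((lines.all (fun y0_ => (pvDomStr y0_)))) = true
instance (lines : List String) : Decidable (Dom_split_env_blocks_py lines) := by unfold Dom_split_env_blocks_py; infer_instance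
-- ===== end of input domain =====

-- B replaces A's per-line state machine plus trimming helper by a direct two-pointer
-- scan over maximal non-blank runs (objective: simpler; same asymptotic cost).


-- ===== PORT A =====
-- truthiness of line.strip(): True iff the stripped string is non-empty
def pvBlank (l : String) : Bool := (PySem.Chars.strip l.toList).isEmpty

-- the first 'while' of _build_chunk; fuel (e+1-s).toNat bounds its iterations exactly
def bcFwd (lines : List String) : Nat → Int → Int → Int
  | 0, s, _ => s
  | f+1, s, e =>
    if s ≤ e ∧ pvBlank (PySem.List.pyGetD lines s "") = true then bcFwd lines f (s+1) e else s

-- the second 'while' of _build_chunk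
def bcBwd (lines : List String) : Nat → Int → Int → Int
  | 0, _, e => e
  | f+1, s, e =>
    if s ≤ e ∧ pvBlank (PySem.List.pyGetD lines e "") = true then bcBwd lines f s (e-1) else e

-- after both trim loops: the return / None at the end of _build_chunk
def bcRet (lines : List String) (s e : Int) : Option (Int × Int × String) :=
  if s > e then none
  else some (s + 1, e + 1,
    PySem.Str.join "\n" (PySem.List.slice lines (some s) (some (e + 1))))

-- second trim loop then return (s = start_index after the first loop)
def bcFinish (lines : List String) (s e0 : Int) : Option (Int × Int × String) :=
  bcRet lines s (bcBwd lines (e0 + 1 - s).toNat s e0)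

def build_chunk (lines : List String) (start_index end_index : Int) :
    Option (Int × Int × String) :=
  bcFinish lines (bcFwd lines (end_index + 1 - start_index).toNat start_index end_index)
    end_index

-- the 'for index, line in enumerate(lines)' loop; state = (chunks, block_start)
def aLoop (lines : List String) :
    List String → Int → List (Int × Int × String) → Option Int →
    List (Int × Int × String) × Option Int
  | [], _, chunks, bs => (chunks, bs)
  | l :: rest, idx, chunks, bs =>
    if pvBlank l then
      match bs with
      | some b =>
        let chunks' :=
          match build_chunk lines b (idx - 1) with
          | some c => chunks ++ [c]
          | none => chunks
        aLoop lines rest (idx + 1) chunks' none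
      | none => aLoop lines rest (idx + 1) chunks none
    else
      match bs with
      | none => aLoop lines rest (idx + 1) chunks (some idx)
      | some b => aLoop lines rest (idx + 1) chunks (some b)

-- the code after the loop (flush the open block)
def aFinish (lines : List String)
    (st : List (Int × Int × String) × Option Int) : List (Int × Int × String) :=
  match st.2 with
  | some b =>
    match build_chunk lines b ((lines.length : Int) - 1) with
    | some c => st.1 ++ [c]
    | none => st.1
  | none => st.1

def split_env_blocks_py (lines : List String) : List (Int × Int × String) :=
  aFinish lines (aLoop lines lines 0 [] none)

-- ===== PORT B =====
-- inner 'while j < n and lines[j].strip(): j += 1'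
def bScanEnd (lines : List String) (n : Nat) (j : Nat) : Nat :=
  if j < n ∧ pvBlank (PySem.List.pyGetD lines (j : Int) "") = false then
    bScanEnd lines n (j + 1)
  else j
termination_by n - j

-- needed by bLoop's termination proof
theorem bScanEnd_ge (lines : List String) (n : Nat) : ∀ j, j ≤ bScanEnd lines n j := by
  intro j
  induction hn : n - j using Nat.strong_induction_on generalizing j with
  | _ m ih =>
    rw [bScanEnd]
    split
    · rename_i h
      exact le_trans (Nat.le_succ j) (ih (n - (j+1)) (by omega) (j+1) rfl)
    · exact le_refl j

-- outer 'while i < n' loop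
def bLoop (lines : List String) (n : Nat) (i : Nat)
    (chunks : List (Int × Int × String)) : List (Int × Int × String) :=
  if _h : i < n then
    if pvBlank (PySem.List.pyGetD lines (i : Int) "") then
      bLoop lines n (i + 1) chunks
    else
      let j := bScanEnd lines n i
      bLoop lines n j (chunks ++
        [((i : Int) + 1, (j : Int),
          PySem.Str.join "\n" (PySem.List.slice lines (some (i : Int)) (some (j : Int))))])
  else chunks
termination_by n - i
decreasing_by
  · omega
  · have h1 : i + 1 ≤ bScanEnd lines n (i + 1) := bScanEnd_ge lines n (i + 1)
    have h2 : bScanEnd lines n i = bScanEnd lines n (i + 1) := by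
      rw [bScanEnd]; simp_all
    omega

def split_env_blocks_py_alt (lines : List String) : List (Int × Int × String) :=
  bLoop lines lines.length 0 []

-- ===== PRECONDITION & SPEC =====
def Spec_split_env_blocks_py (lines : List String) (out : List (Int × Int × String)) : Prop := out = split_env_blocks_py_alt lines
instance (lines : List String) (out : List (Int × Int × String)) : Decidable (Spec_split_env_blocks_py lines out) := by unfold Spec_split_env_blocks_py; infer_instance

-- ===== CLAIM (what is proved, stated in full; the proofs are below) =====
def Claim_equal_split_env_blocks_py : Prop := ∀ (lines : List String), Dom_split_env_blocks_py lines → Spec_split_env_blocks_py lines (split_env_blocks_py lines)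

-- ===== LEMMAS AND PROOFS =====

theorem bcFwd_stop (lines : List String) (f : Nat) (s e : Int)
    (h : pvBlank (PySem.List.pyGetD lines s "") = false) :
    bcFwd lines f s e = s := by
  cases f <;> simp [bcFwd, h]

theorem bcBwd_stop (lines : List String) (f : Nat) (s e : Int)
    (h : pvBlank (PySem.List.pyGetD lines e "") = false) :
    bcBwd lines f s e = e := by
  cases f <;> simp [bcBwd, h]

theorem build_chunk_eq (lines : List String) (s e : Nat) (hse : s ≤ e)
    (hs : pvBlank (lines.getD s "") = false)
    (he : pvBlank (lines.getD e "") = false) :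
    build_chunk lines (s : Int) (e : Int) =
      some ((s : Int) + 1, (e : Int) + 1,
        PySem.Str.join "\n" (PySem.List.slice lines (some (s : Int)) (some ((e : Int) + 1)))) := by
  unfold build_chunk bcFinish bcRet
  rw [bcFwd_stop lines _ _ _ (by simpa using hs)]
  rw [bcBwd_stop lines _ _ _ (by simpa using he)]
  rw [if_neg (by omega)]

theorem bScanEnd_stop (lines : List String) (n j : Nat)
    (h : ¬ (j < n ∧ pvBlank (PySem.List.pyGetD lines (j : Int) "") = false)) :
    bScanEnd lines n j = j := by
  rw [bScanEnd]; simp_all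

theorem bScanEnd_step (lines : List String) (n j : Nat) (h1 : j < n)
    (h2 : pvBlank (PySem.List.pyGetD lines (j : Int) "") = false) :
    bScanEnd lines n j = bScanEnd lines n (j + 1) := by
  rw [bScanEnd]; simp_all

theorem main_base (lines : List String) :
    (∀ chunks,
      aFinish lines (aLoop lines (lines.drop lines.length) ((lines.length : Nat) : Int) chunks none) =
        bLoop lines lines.length lines.length chunks) ∧
    (∀ (b : Nat) chunks, b < lines.length →
      (∀ k, b ≤ k → k < lines.length → pvBlank (lines.getD k "") = false) →
      aFinish lines (aLoop lines (lines.drop lines.length) ((lines.length : Nat) : Int) chunks (some (b : Int))) =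
        bLoop lines lines.length (bScanEnd lines lines.length lines.length)
          (chunks ++ [((b : Int) + 1, ((bScanEnd lines lines.length lines.length : Nat) : Int),
            PySem.Str.join "\n" (PySem.List.slice lines (some (b : Int))
              (some ((bScanEnd lines lines.length lines.length : Nat) : Int))))])) := by
  have hscan : bScanEnd lines lines.length lines.length = lines.length :=
    bScanEnd_stop lines _ _ (by simp)
  have hdrop : lines.drop lines.length = [] := List.drop_length
  constructor
  · intro chunks
    rw [hdrop]
    show aFinish lines (chunks, none) = _
    rw [bLoop, dif_neg (by omega)]
    simp [aFinish]
  · intro b chunks hblt hinv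
    rw [hdrop, hscan]
    show aFinish lines (chunks, some (b : Int)) = _
    conv_rhs => rw [bLoop]
    rw [dif_neg (by omega)]
    unfold aFinish
    have hn1 : ((lines.length : Nat) : Int) - 1 = ((lines.length - 1 : Nat) : Int) := by omega
    show (match build_chunk lines (b : Int) (((lines.length : Nat) : Int) - 1) with
      | some c => chunks ++ [c]
      | none => chunks) = _
    rw [hn1, build_chunk_eq lines b (lines.length - 1) (by omega)
      (hinv b (le_refl b) hblt) (hinv (lines.length - 1) (by omega) (by omega))]
    have h2 : ((lines.length - 1 : Nat) : Int) + 1 = ((lines.length : Nat) : Int) := by omega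
    rw [h2]

theorem main_comb (lines : List String) (fuel : Nat) :
    ∀ idx : Nat, lines.length - idx ≤ fuel → idx ≤ lines.length →
    (∀ chunks,
      aFinish lines (aLoop lines (lines.drop idx) (idx : Int) chunks none) =
        bLoop lines lines.length idx chunks) ∧
    (∀ (b : Nat) chunks, b < idx →
      (∀ k, b ≤ k → k < idx → pvBlank (lines.getD k "") = false) →
      aFinish lines (aLoop lines (lines.drop idx) (idx : Int) chunks (some (b : Int))) =
        bLoop lines lines.length (bScanEnd lines lines.length idx)
          (chunks ++ [((b : Int) + 1, ((bScanEnd lines lines.length idx : Nat) : Int),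
            PySem.Str.join "\n" (PySem.List.slice lines (some (b : Int))
              (some ((bScanEnd lines lines.length idx : Nat) : Int))))])) := by
  induction fuel with
  | zero =>
    intro idx hf hle
    have hidx : idx = lines.length := by omega
    subst hidx
    exact main_base lines
  | succ f ih =>
    intro idx hf hle
    by_cases hidx : idx < lines.length
    · have hdrop : lines.drop idx = lines[idx] :: lines.drop (idx + 1) :=
        (List.getElem_cons_drop hidx).symm
      have hpg : PySem.List.pyGetD lines ((idx : Nat) : Int) "" = lines.getD idx "" := by
        simp
      have hgd : lines.getD idx "" = lines[idx] := List.getD_eq_getElem lines "" hidx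
      have hcast : ((idx : Nat) : Int) + 1 = ((idx + 1 : Nat) : Int) := by push_cast; ring
      have ihx := ih (idx + 1) (by omega) (by omega)
      by_cases hb : pvBlank lines[idx] = true
      · -- lines[idx] is blank
        constructor
        · intro chunks
          rw [hdrop]
          show aFinish lines (aLoop lines _ _ _ _) = _
          rw [aLoop]
          rw [if_pos hb, hcast, ihx.1 chunks]
          conv_rhs => rw [bLoop]
          rw [dif_pos hidx, if_pos (by rw [hpg, hgd]; exact hb)]
        · intro b chunks hblt hinv
          rw [hdrop]
          show aFinish lines (aLoop lines _ _ _ _) = _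
          rw [aLoop, if_pos hb]
          have hn1 : ((idx : Nat) : Int) - 1 = ((idx - 1 : Nat) : Int) := by omega
          rw [hn1, build_chunk_eq lines b (idx - 1) (by omega)
            (hinv b (le_refl b) hblt) (hinv (idx - 1) (by omega) (by omega))]
          have h2 : ((idx - 1 : Nat) : Int) + 1 = ((idx : Nat) : Int) := by omega
          rw [h2, hcast, ihx.1]
          have hscan : bScanEnd lines lines.length idx = idx :=
            bScanEnd_stop lines _ _ (by rw [hpg, hgd]; simp [hb])
          rw [hscan]
          conv_rhs => rw [bLoop]
          rw [dif_pos hidx, if_pos (by rw [hpg, hgd]; exact hb)]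
      · -- lines[idx] is not blank
        have hb' : pvBlank lines[idx] = false := by simpa using hb
        have hscan : bScanEnd lines lines.length idx = bScanEnd lines lines.length (idx + 1) :=
          bScanEnd_step lines _ _ hidx (by rw [hpg, hgd]; exact hb')
        constructor
        · intro chunks
          rw [hdrop]
          show aFinish lines (aLoop lines _ _ _ _) = _
          rw [aLoop, if_neg (by simp [hb']), hcast]
          rw [ihx.2 idx chunks (by omega)
            (fun k hk1 hk2 => by
              have : k = idx := by omega
              subst this; rw [hgd.symm] at hb'; exact hb')]
          conv_rhs => rw [bLoop]
          rw [dif_pos hidx, if_neg (by rw [hpg, hgd]; simp [hb']), hscan]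
        · intro b chunks hblt hinv
          rw [hdrop]
          show aFinish lines (aLoop lines _ _ _ _) = _
          rw [aLoop, if_neg (by simp [hb']), hcast]
          rw [ihx.2 b chunks (by omega)
            (fun k hk1 hk2 => by
              by_cases hk : k < idx
              · exact hinv k hk1 hk
              · have : k = idx := by omega
                subst this; rw [hgd.symm] at hb'; exact hb')]
          rw [hscan]
    · have hidx' : idx = lines.length := by omega
      subst hidx'
      exact main_base lines

-- ===== VERDICT (by name: the statement is the Claim_ definition above) =====
theorem split_env_blocks_py_spec : Claim_equal_split_env_blocks_py := by
  intro lines _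
  show split_env_blocks_py lines = split_env_blocks_py_alt lines
  have h := (main_comb lines lines.length 0 (by omega) (by omega)).1 []
  simpa [split_env_blocks_py, split_env_blocks_py_alt] using h
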